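-- pv_equiv track=rewrite | github.com/haridandapani/SCIJPartnerMatching | file_processing/excel_opener.py | get_least_paired_matchable_students
-- ===== SOURCE A (Python) =====
-- def get_least_paired_matchable_students(student_list, pairable_dict):
--     possible_students = list()
--     min_pairs = float('inf')
--
--     for student in student_list:
--         pair_len = len(pairable_dict[student])
--         if pair_len < min_pairs:
--             possible_students = list()
--             possible_students.append(student)
--             min_pairs = pair_len
--         elif pair_len == min_pairs:
--             possible_students.append(student)
--
--     return possible_students
-- ===== SOURCE B (Python) =====
-- def get_least_paired_matchable_students(student_list, pairable_dict):
--     if not student_list: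
--         return []
--     m = min(len(pairable_dict[s]) for s in student_list)
--     return [s for s in student_list if len(pairable_dict[s]) == m]
-- ===== Notes on version B (the rewrite author's own statement) =====
-- stated objective: simpler
-- what changed: Replaces A's single interleaved minimum-tracking pass (with list resets on each new minimum) by a two-phase min-then-filter: compute the minimum pairable count, then select students matching it in input order.
import Mathlib
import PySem

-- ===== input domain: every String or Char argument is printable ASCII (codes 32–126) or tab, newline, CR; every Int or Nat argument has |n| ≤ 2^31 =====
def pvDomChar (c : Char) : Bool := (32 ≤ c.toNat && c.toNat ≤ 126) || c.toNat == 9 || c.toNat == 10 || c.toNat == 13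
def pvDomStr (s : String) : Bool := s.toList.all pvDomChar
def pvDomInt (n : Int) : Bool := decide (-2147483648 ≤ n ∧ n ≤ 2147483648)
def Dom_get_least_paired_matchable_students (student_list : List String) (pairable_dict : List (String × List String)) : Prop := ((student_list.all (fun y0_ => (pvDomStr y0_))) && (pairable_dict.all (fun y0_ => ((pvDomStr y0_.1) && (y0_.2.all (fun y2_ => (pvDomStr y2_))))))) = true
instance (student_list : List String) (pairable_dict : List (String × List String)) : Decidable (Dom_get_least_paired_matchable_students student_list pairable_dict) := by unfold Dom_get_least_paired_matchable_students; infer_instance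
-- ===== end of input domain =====

-- B replaces A's single interleaved minimum-tracking pass by a two-phase min-then-filter decomposition (same return value; no speed claim).


-- shared dict-lookup primitive: pairable_dict[s] (first match; [] only reachable outside Pre_, where Python raises KeyError)
def pvLookup (d : List (String × List String)) (s : String) : List String :=
  ((d.find? (fun p => p.1 == s)).map Prod.snd).getD []

-- ===== PORT A =====
-- the for-loop with state (possible_students, min_pairs); min_pairs = none models float('inf')
def glpGoA (d : List (String × List String)) :
    List String → List String → Option Nat → List String
  | [], acc, _ => acc
  | s :: rest, acc, m =>
      let pair_len := (pvLookup d s).length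
      match m with
      | none => glpGoA d rest [s] (some pair_len)
      | some mv =>
          if pair_len < mv then glpGoA d rest [s] (some pair_len)
          else if pair_len = mv then glpGoA d rest (acc ++ [s]) (some mv)
          else glpGoA d rest acc (some mv)

def get_least_paired_matchable_students (student_list : List String) (pairable_dict : List (String × List String)) : List String :=
  glpGoA pairable_dict student_list [] none

-- ===== PORT B =====
def get_least_paired_matchable_students_alt (student_list : List String) (pairable_dict : List (String × List String)) : List String :=
  match student_list with
  | [] => []
  | s :: rest =>
      let m := rest.foldl (fun a x => min a (pvLookup pairable_dict x).length)
                 (pvLookup pairable_dict s).length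
      (s :: rest).filter (fun x => (pvLookup pairable_dict x).length == m)

-- ===== PRECONDITION & SPEC =====
-- Pre_: every student occurs as a key of the dict; elsewhere Python A raises KeyError.
def Pre_get_least_paired_matchable_students (student_list : List String) (pairable_dict : List (String × List String)) : Prop :=
  ∀ s ∈ student_list, (pairable_dict.find? (fun p => p.1 == s)).isSome = true
instance (student_list : List String) (pairable_dict : List (String × List String)) : Decidable (Pre_get_least_paired_matchable_students student_list pairable_dict) := by unfold Pre_get_least_paired_matchable_students; infer_instance
def pvWitness_get_least_paired_matchable_students : List String × (List (String × List String)) := (["a", "b"], [("a", ["b"]), ("b", ["a", "c"])])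

def Spec_get_least_paired_matchable_students (student_list : List String) (pairable_dict : List (String × List String)) (out : List String) : Prop := out = get_least_paired_matchable_students_alt student_list pairable_dict
instance (student_list : List String) (pairable_dict : List (String × List String)) (out : List String) : Decidable (Spec_get_least_paired_matchable_students student_list pairable_dict out) := by unfold Spec_get_least_paired_matchable_students; infer_instance

-- ===== CLAIM (what is proved, stated in full; the proofs are below) =====
def Claim_equal_get_least_paired_matchable_students : Prop := ∀ (student_list : List String) (pairable_dict : List (String × List String)), Dom_get_least_paired_matchable_students student_list pairable_dict → Pre_get_least_paired_matchable_students student_list pairable_dict → Spec_get_least_paired_matchable_students student_list pairable_dict (get_least_paired_matchable_students student_list pairable_dict)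

-- ===== LEMMAS AND PROOFS =====

-- running minimum of the pairable counts over l, seeded with m
def glpMin (d : List (String × List String)) (l : List String) (m : Nat) : Nat :=
  l.foldl (fun a x => min a (pvLookup d x).length) m

lemma glpMin_le_seed (d : List (String × List String)) (l : List String) (m : Nat) :
    glpMin d l m ≤ m := by
  induction l generalizing m with
  | nil => simp [glpMin]
  | cons x rest ih =>
      calc glpMin d (x :: rest) m = glpMin d rest (min m (pvLookup d x).length) := rfl
        _ ≤ min m (pvLookup d x).length := ih _
        _ ≤ m := Nat.min_le_left _ _

-- characterisation of A's loop from a finite min_pairs state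
lemma glpGoA_some (d : List (String × List String)) (l : List String) :
    ∀ (acc : List String) (m : Nat),
      glpGoA d l acc (some m) =
        if glpMin d l m < m then
          l.filter (fun x => (pvLookup d x).length == glpMin d l m)
        else
          acc ++ l.filter (fun x => (pvLookup d x).length == m) := by
  induction l with
  | nil => intro acc m; simp [glpGoA, glpMin]
  | cons x rest ih =>
      intro acc m
      have hM : glpMin d (x :: rest) m = glpMin d rest (min m (pvLookup d x).length) := rfl
      set k := (pvLookup d x).length with hk
      by_cases h1 : k < m
      · have hmin : min m k = k := Nat.min_eq_right (Nat.le_of_lt h1)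
        have hstep : glpGoA d (x :: rest) acc (some m) = glpGoA d rest [x] (some k) := by
          simp [glpGoA, ← hk, h1]
        rw [hstep, ih]
        have hM' : glpMin d (x :: rest) m = glpMin d rest k := by rw [hM, hmin]
        have hle : glpMin d rest k ≤ k := glpMin_le_seed d rest k
        by_cases h2 : glpMin d rest k < k
        · -- a strictly smaller element occurs later: x is filtered out on the RHS
          have hout : glpMin d (x :: rest) m < m := by omega
          rw [if_pos h2, if_pos (hM' ▸ hout)]
          rw [hM']
          have hne : (k == glpMin d rest k) = false := by
            simp [Nat.ne_of_gt h2]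
          simp [List.filter, ← hk, hne]
        · -- x itself achieves the minimum k
          have heq : glpMin d rest k = k := Nat.le_antisymm hle (Nat.le_of_not_lt h2)
          have hout : glpMin d (x :: rest) m < m := by omega
          rw [if_neg h2, if_pos (hM' ▸ hout), hM', heq]
          simp [List.filter, ← hk]
      · have hmin : min m k = m := Nat.min_eq_left (Nat.le_of_not_lt h1)
        have hM' : glpMin d (x :: rest) m = glpMin d rest m := by rw [hM, hmin]
        by_cases h2 : k = m
        · have hstep : glpGoA d (x :: rest) acc (some m) = glpGoA d rest (acc ++ [x]) (some m) := by
            simp [glpGoA, ← hk, h2]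
          rw [hstep, ih, hM']
          by_cases h3 : glpMin d rest m < m
          · rw [if_pos h3, if_pos h3]
            have hne : (k == glpMin d rest m) = false := by
              simp; omega
            simp [List.filter, ← hk, hne]
          · rw [if_neg h3, if_neg h3]
            simp [List.filter, ← hk, h2]
        · -- k > m: element ignored
          have hgt : m < k := by omega
          have hstep : glpGoA d (x :: rest) acc (some m) = glpGoA d rest acc (some m) := by
            simp [glpGoA, ← hk, h1, h2]
          rw [hstep, ih, hM']
          have hlem : glpMin d rest m ≤ m := glpMin_le_seed d rest m
          by_cases h3 : glpMin d rest m < m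
          · rw [if_pos h3, if_pos h3]
            have hne : (k == glpMin d rest m) = false := by simp; omega
            simp [List.filter, ← hk, hne]
          · rw [if_neg h3, if_neg h3]
            have hne : (k == m) = false := by simp; omega
            simp [List.filter, ← hk, hne]

-- ===== VERDICT (by name: the statement is the Claim_ definition above) =====
theorem get_least_paired_matchable_students_spec : Claim_equal_get_least_paired_matchable_students := by
  intro sl d _ _
  unfold Spec_get_least_paired_matchable_students
  cases sl with
  | nil => rfl
  | cons s rest =>
      show glpGoA d rest [s] (some (pvLookup d s).length) =
        List.filter (fun x => (pvLookup d x).length == glpMin d rest (pvLookup d s).length) (s :: rest)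
      rw [glpGoA_some]
      set k := (pvLookup d s).length with hk
      have hle : glpMin d rest k ≤ k := glpMin_le_seed d rest k
      by_cases h2 : glpMin d rest k < k
      · rw [if_pos h2]
        have hne : (k == glpMin d rest k) = false := by simp; omega
        simp [List.filter, ← hk, hne]
      · have heq : glpMin d rest k = k := Nat.le_antisymm hle (Nat.le_of_not_lt h2)
        rw [if_neg h2, heq]
        simp [List.filter, ← hk]
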